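-- pv_equiv track=rewrite | github.com/hjj1998/CSEE4119_CustomedTcpOverUdp | Segment.py | total_2_bytes_sum
-- ===== SOURCE A (Python) =====
-- def total_2_bytes_sum(entire_segment):
--
--     payload_len = len(entire_segment)
--     # solve the problem where the length is odd
--     if payload_len & 1:
--         payload_len -= 1
--         sum = ord(entire_segment[payload_len])
--     else:
--         sum = 0
--
--     # iterate through chars two by two and sum their byte values
--     while payload_len > 0:
--         payload_len -= 2
--         sum += (ord(entire_segment[payload_len + 1]) << 8) + ord(entire_segment[payload_len])
--     # wrap overflow around
--     sum = (sum >> 16) + (sum & 0xffff)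
--     return sum
-- ===== SOURCE B (Python) =====
-- def total_2_bytes_sum(entire_segment):
--     # one forward pass: even-index bytes go to the low accumulator, odd-index to the high one
--     low = 0
--     high = 0
--     for i, c in enumerate(entire_segment):
--         if i % 2 == 1:
--             high += ord(c)
--         else:
--             low += ord(c)
--     s = (high << 8) + low
--     return (s >> 16) + (s & 0xffff)
-- ===== Notes on version B (the rewrite author's own statement) =====
-- stated objective: simpler
-- what changed: Replaces A's backward two-bytes-at-a-time while loop plus a special branch for odd length by a single forward enumerate pass that accumulates even-index bytes (low) and odd-index bytes (high) and combines them once; the odd-length case needs no special handling.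
import Mathlib
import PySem

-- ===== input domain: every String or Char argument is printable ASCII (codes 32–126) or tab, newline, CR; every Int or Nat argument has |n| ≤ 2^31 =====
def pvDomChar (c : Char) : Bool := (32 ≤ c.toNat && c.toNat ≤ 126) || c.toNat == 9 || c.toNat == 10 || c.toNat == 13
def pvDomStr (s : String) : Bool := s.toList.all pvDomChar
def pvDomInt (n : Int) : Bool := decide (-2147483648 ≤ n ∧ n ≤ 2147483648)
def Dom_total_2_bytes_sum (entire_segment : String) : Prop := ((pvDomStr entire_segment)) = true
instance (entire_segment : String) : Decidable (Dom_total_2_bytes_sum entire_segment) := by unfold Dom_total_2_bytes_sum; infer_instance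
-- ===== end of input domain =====

-- B replaces A's backward two-at-a-time while loop (with its odd-length special case) by a single
-- forward pass with two parity accumulators — objective: simpler (no branch on odd length).

-- ===== PORT A =====
-- the while loop: payload_len -= 2; sum += (ord(s[pl+1]) << 8) + ord(s[pl])
-- indexing via pyGetD: in every execution of A the index is in range, so the default is never read
def pvALoop (cs : List Char) (pl : Int) (sum : Int) : Int :=
  if _h : pl > 0 then
    pvALoop cs (pl - 2)
      (sum + (((PySem.List.pyGetD cs (pl - 1) 'A').toNat : Int) <<< (8:Nat)
              + ((PySem.List.pyGetD cs (pl - 2) 'A').toNat : Int)))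
  else sum
termination_by pl.toNat
decreasing_by omega

def total_2_bytes_sum (entire_segment : String) : Int :=
  let cs := entire_segment.toList
  let payload_len : Int := cs.length
  let sum :=
    if PySem.Int.band payload_len 1 ≠ 0 then
      pvALoop cs (payload_len - 1) ((PySem.List.pyGetD cs (payload_len - 1) 'A').toNat : Int)
    else
      pvALoop cs payload_len 0
  (sum >>> (16:Nat)) + PySem.Int.band sum 0xffff

-- ===== PORT B =====
def total_2_bytes_sum_alt (entire_segment : String) : Int :=
  let lh := (PySem.List.enumerate entire_segment.toList 0).foldl
    (fun (lh : Int × Int) ic =>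
      if PySem.Int.mod ic.1 2 = 1 then (lh.1, lh.2 + (ic.2.toNat : Int))
      else (lh.1 + (ic.2.toNat : Int), lh.2)) (0, 0)
  let s := (lh.2 <<< (8:Nat)) + lh.1
  (s >>> (16:Nat)) + PySem.Int.band s 0xffff

-- ===== PRECONDITION & SPEC =====
def Spec_total_2_bytes_sum (entire_segment : String) (out : Int) : Prop := out = total_2_bytes_sum_alt entire_segment
instance (entire_segment : String) (out : Int) : Decidable (Spec_total_2_bytes_sum entire_segment out) := by unfold Spec_total_2_bytes_sum; infer_instance

-- ===== CLAIM (what is proved, stated in full; the proofs are below) =====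
def Claim_equal_total_2_bytes_sum : Prop := ∀ (entire_segment : String), Dom_total_2_bytes_sum entire_segment → Spec_total_2_bytes_sum entire_segment (total_2_bytes_sum entire_segment)

-- ===== LEMMAS AND PROOFS =====

-- sum of byte values at even (resp. odd) positions
mutual
def pvESum : List Char → Int
  | [] => 0
  | c :: t => (c.toNat : Int) + pvOSum t
def pvOSum : List Char → Int
  | [] => 0
  | _ :: t => pvESum t
end

theorem pvSum_append (l r : List Char) :
    pvESum (l ++ r) = pvESum l + (if l.length % 2 = 0 then pvESum r else pvOSum r) ∧
    pvOSum (l ++ r) = pvOSum l + (if l.length % 2 = 0 then pvOSum r else pvESum r) := by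
  induction l with
  | nil => simp [pvESum, pvOSum]
  | cons c t ih =>
    rcases ih with ⟨ihe, iho⟩
    simp only [List.cons_append, pvESum, pvOSum, List.length_cons, ihe, iho]
    rcases Nat.even_or_odd t.length with h | h
    · have h0 : t.length % 2 = 0 := Nat.even_iff.mp h
      have h1 : (t.length + 1) % 2 = 1 := by omega
      simp [h0, h1]; ring
    · have h0 : t.length % 2 = 1 := Nat.odd_iff.mp h
      have h1 : (t.length + 1) % 2 = 0 := by omega
      simp [h0, h1]; ring

theorem pvALoop_eq (cs : List Char) (m : Nat) (hm : 2 * m ≤ cs.length) (sum : Int) :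
    pvALoop cs (2 * m) sum
      = sum + pvESum (cs.take (2 * m)) + 256 * pvOSum (cs.take (2 * m)) := by
  induction m generalizing sum with
  | zero => rw [pvALoop]; simp [pvESum, pvOSum]
  | succ k ih =>
    rw [pvALoop]
    simp only [Nat.cast_add, Nat.cast_one]
    have hk1 : 2 * k + 1 < cs.length := by omega
    have hk0 : 2 * k < cs.length := by omega
    have e1 : ((2 : Int) * ((k:Int) + 1) - 1) = ((2 * k + 1 : Nat) : Int) := by push_cast; ring
    have e2 : ((2 : Int) * ((k:Int) + 1) - 2) = ((2 * k : Nat) : Int) := by push_cast; ring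
    have hpos : (2 : Int) * ((k:Int) + 1) > 0 := by positivity
    rw [dif_pos hpos, e1, e2, PySem.List.pyGetD_natCast, PySem.List.pyGetD_natCast]
    rw [show ((2 * k : Nat) : Int) = 2 * (k : Int) from by push_cast; ring, ih (by omega)]
    have htake : cs.take (2 * (k + 1)) = cs.take (2 * k) ++ [cs[2 * k], cs[2 * k + 1]] := by
      have h1 : cs.take (2 * k + 1 + 1) = cs.take (2 * k + 1) ++ [cs[2 * k + 1]] :=
        List.take_succ_eq_append_getElem hk1
      have h2 : cs.take (2 * k + 1) = cs.take (2 * k) ++ [cs[2 * k]] :=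
        List.take_succ_eq_append_getElem hk0
      rw [show 2 * (k + 1) = 2 * k + 1 + 1 from by ring, h1, h2, List.append_assoc]
      rfl
    have hlen : (cs.take (2 * k)).length % 2 = 0 := by
      rw [List.length_take]; omega
    have he := (pvSum_append (cs.take (2 * k)) [cs[2 * k], cs[2 * k + 1]]).1
    have ho := (pvSum_append (cs.take (2 * k)) [cs[2 * k], cs[2 * k + 1]]).2
    rw [htake, he, ho]
    simp only [hlen, if_pos, pvESum, pvOSum]
    have hg0 : cs.getD (2 * k) 'A' = cs[2 * k] := List.getD_eq_getElem cs 'A' hk0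
    have hg1 : cs.getD (2 * k + 1) 'A' = cs[2 * k + 1] := List.getD_eq_getElem cs 'A' hk1
    rw [hg0, hg1]
    simp [Int.shiftLeft_eq]
    ring

theorem pvBLoop_eq (cs : List Char) (k l0 h0 : Int) :
    (PySem.List.enumerate cs k).foldl
      (fun (lh : Int × Int) ic =>
        if PySem.Int.mod ic.1 2 = 1 then (lh.1, lh.2 + (ic.2.toNat : Int))
        else (lh.1 + (ic.2.toNat : Int), lh.2)) (l0, h0)
      = if PySem.Int.mod k 2 = 1 then (l0 + pvOSum cs, h0 + pvESum cs)
        else (l0 + pvESum cs, h0 + pvOSum cs) := by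
  induction cs generalizing k l0 h0 with
  | nil => simp [PySem.List.enumerate_nil, pvESum, pvOSum]
  | cons c t ih =>
    rw [PySem.List.enumerate_cons, List.foldl_cons]
    have hflip : PySem.Int.mod (k + 1) 2 = 1 ↔ ¬ (PySem.Int.mod k 2 = 1) := by
      have h1 := PySem.Int.mod_two_eq k
      have h2 := PySem.Int.mod_two_eq (k + 1)
      have e1 := PySem.Int.floordiv_mul_add_mod k 2
      have e2 := PySem.Int.floordiv_mul_add_mod (k + 1) 2
      constructor <;> intro h <;> omega
    rcases PySem.Int.mod_two_eq k with hk | hk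
    · have hk1 : PySem.Int.mod (k + 1) 2 = 1 := by rw [hflip, hk]; omega
      simp only [hk, hk1, ih]
      simp [pvESum, pvOSum, Prod.ext_iff]
      ring
    · have hk0 : ¬ (PySem.Int.mod (k + 1) 2 = 1) := by
        intro h; rw [hflip] at h; exact h hk
      simp only [hk, ih, if_neg hk0]
      simp [pvESum, pvOSum, Prod.ext_iff]
      ring

-- ===== VERDICT (by name: the statement is the Claim_ definition above) =====
theorem total_2_bytes_sum_spec : Claim_equal_total_2_bytes_sum := by
  intro s _
  unfold Spec_total_2_bytes_sum total_2_bytes_sum total_2_bytes_sum_alt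
  simp only [pvBLoop_eq s.toList 0 0 0]
  have h0 : ¬ (PySem.Int.mod (0:Int) 2 = 1) := by decide
  rw [if_neg h0]
  simp only [zero_add, String.length_toList]
  have hsh : ∀ x : Int, x <<< (8:Nat) = 256 * x := by
    intro x; simp [Int.shiftLeft_eq]; ring
  have hmod : PySem.Int.mod ((s.length : Nat) : Int) 2 = ((s.length % 2 : Nat) : Int) := by
    exact_mod_cast PySem.Int.mod_natCast s.length 2
  have hL : s.toList.length = s.length := String.length_toList
  have key :
      (if PySem.Int.band (s.length : Int) 1 ≠ 0 then
          pvALoop s.toList ((s.length : Int) - 1)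
            ((PySem.List.pyGetD s.toList ((s.length : Int) - 1) 'A').toNat : Int)
        else pvALoop s.toList (s.length : Int) 0)
        = pvOSum s.toList <<< (8:Nat) + pvESum s.toList := by
    rcases Nat.even_or_odd s.length with h | h
    · obtain ⟨m, hm⟩ := h
      have hband : PySem.Int.band (s.length : Int) 1 = 0 := by
        rw [PySem.Int.band_one, hmod]; omega
      have hc : ¬ (PySem.Int.band (s.length : Int) 1 ≠ 0) := by simp [hband]
      rw [if_neg hc]
      have hlen2 : s.length = 2 * m := by omega
      rw [hlen2]
      push_cast
      rw [pvALoop_eq s.toList m (by omega) 0, List.take_of_length_le (by omega)]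
      rw [hsh]
      ring
    · obtain ⟨m, hm⟩ := h
      have hband : PySem.Int.band (s.length : Int) 1 = 1 := by
        rw [PySem.Int.band_one, hmod]; omega
      have hc : PySem.Int.band (s.length : Int) 1 ≠ 0 := by simp [hband]
      rw [if_pos hc]
      have hlen : (s.length : Int) - 1 = ((2 * m : Nat) : Int) := by push_cast; omega
      rw [hlen, PySem.List.pyGetD_natCast]
      push_cast
      rw [pvALoop_eq s.toList m (by omega)]
      have hi : 2 * m < s.toList.length := by omega
      have hg : s.toList.getD (2 * m) 'A' = s.toList[2 * m] := List.getD_eq_getElem s.toList 'A' hi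
      have hsplit : s.toList = s.toList.take (2 * m) ++ [s.toList[2 * m]] := by
        conv_lhs => rw [← List.take_of_length_le (le_of_eq (show s.toList.length = 2 * m + 1 by omega))]
        exact List.take_succ_eq_append_getElem hi
      have he := (pvSum_append (s.toList.take (2 * m)) [s.toList[2 * m]]).1
      have ho := (pvSum_append (s.toList.take (2 * m)) [s.toList[2 * m]]).2
      have hlen0 : (s.toList.take (2 * m)).length % 2 = 0 := by rw [List.length_take]; omega
      conv_rhs => rw [hsplit]
      rw [he, ho]
      simp only [hlen0, if_pos, pvESum, pvOSum, hg, hsh]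
      ring
  rw [key]
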